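-- pv_equiv track=rewrite | github.com/tesserae/tesserae-v6 | backend/bigram_frequency.py | extract_word_pairs
-- ===== SOURCE A (Python) =====
-- def make_bigram_key(lemma1, lemma2):
--     """Create a canonical bigram key (alphabetically sorted for consistency)"""
--     return f"{min(lemma1, lemma2)}|{max(lemma1, lemma2)}"
--
-- def extract_word_pairs(lemmas, max_gap=3):
--     """
--     Extract word pairs within a window (up to max_gap intervening words).
--     This is more relaxed than strict bigrams.
--
--     Args:
--         lemmas: List of lemmas
--         max_gap: Maximum number of words between the pair (default 3)
--
--     Returns:
--         Set of word pair keys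
--     """
--     pairs = set()
--     window = max_gap + 1  # +1 because we count the distance between positions
--     for i in range(len(lemmas)):
--         if not lemmas[i]:
--             continue
--         for j in range(i + 1, min(i + window + 1, len(lemmas))):
--             if lemmas[j]:
--                 pairs.add(make_bigram_key(lemmas[i], lemmas[j]))
--     return pairs
-- ===== SOURCE B (Python) =====
-- def extract_word_pairs(lemmas, max_gap=3):
--     """Single backward pass keeping a bounded lookahead buffer of the next
--     `limit` lemmas; emits each position's key segment, then flattens the
--     segments in position order and deduplicates once at the end."""
--     limit = max_gap + 1
--     if limit < 0:
--         limit = 0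
--     buf = []    # the up-to-`limit` lemmas that follow the current position
--     segs = []
--     for w in reversed(lemmas):
--         if w:
--             segs.append([(w + "|" + v) if w <= v else (v + "|" + w)
--                          for v in buf if v])
--         else:
--             segs.append([])
--         buf = ([w] + buf)[:limit]
--     return set(k for seg in reversed(segs) for k in seg)
-- ===== Notes on version B (the rewrite author's own statement) =====
-- stated objective: alternative
-- what changed: A runs nested index loops over range() and inserts into a set online; B makes one backward pass over the list keeping a bounded lookahead buffer of the next limit lemmas, emits a key segment per position without any index arithmetic or membership tests, then flattens the segments and deduplicates once at the end.
import Mathlib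
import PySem

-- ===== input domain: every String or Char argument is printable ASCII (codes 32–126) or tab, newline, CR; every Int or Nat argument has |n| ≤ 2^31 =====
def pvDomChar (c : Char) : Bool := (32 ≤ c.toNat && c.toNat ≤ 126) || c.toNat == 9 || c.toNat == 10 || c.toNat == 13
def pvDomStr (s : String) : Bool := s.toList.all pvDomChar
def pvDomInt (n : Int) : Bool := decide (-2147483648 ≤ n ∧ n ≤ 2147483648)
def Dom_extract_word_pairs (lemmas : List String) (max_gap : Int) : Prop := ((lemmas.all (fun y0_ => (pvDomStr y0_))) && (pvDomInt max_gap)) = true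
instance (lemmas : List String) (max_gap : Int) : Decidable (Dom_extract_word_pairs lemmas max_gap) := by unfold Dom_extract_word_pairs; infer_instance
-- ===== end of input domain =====

-- B makes one backward pass with a bounded lookahead buffer, emitting per-position key
-- segments, then flattens and deduplicates once; same set, same first-insertion order.

-- ===== PORT A =====
def make_bigram_key (lemma1 lemma2 : String) : String :=
  (min lemma1 lemma2) ++ "|" ++ (max lemma1 lemma2)

def extract_word_pairs (lemmas : List String) (max_gap : Int) : List String :=
  let window := max_gap + 1
  (PySem.List.pyRange 0 (lemmas.length : Int) 1).foldl (fun pairs i =>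
    let wi := PySem.List.pyGetD lemmas i ""
    if wi = "" then pairs
    else (PySem.List.pyRange (i + 1) (min (i + window + 1) (lemmas.length : Int)) 1).foldl
      (fun pairs j =>
        let wj := PySem.List.pyGetD lemmas j ""
        if wj ≠ "" then PySem.Set.add pairs (make_bigram_key wi wj) else pairs)
      pairs)
    PySem.Set.empty

-- ===== PORT B =====
def ewp_key (w v : String) : String :=
  if w ≤ v then w ++ "|" ++ v else v ++ "|" ++ w

-- the 'for w in reversed(lemmas)' loop of Source B: state = (buf, segs); foldr visits the
-- last element first, exactly like the reversed loop, and conses each seg so st.2 ends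
-- up in position order (= reversed(segs) in Source B)
def extract_word_pairs_alt (lemmas : List String) (max_gap : Int) : List String :=
  let limit := (max_gap + 1).toNat   -- Source B: limit = max_gap + 1 clamped below at 0
  let st := lemmas.foldr (fun w st =>
      let seg := if w = "" then []
                 else (st.1.filter (fun v => v ≠ "")).map (fun v => ewp_key w v)
      ((w :: st.1).take limit, seg :: st.2))
    (([] : List String), ([] : List (List String)))
  PySem.Set.ofList st.2.flatten

-- ===== PRECONDITION & SPEC =====
def Spec_extract_word_pairs (lemmas : List String) (max_gap : Int) (out : List String) : Prop := out = extract_word_pairs_alt lemmas max_gap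
instance (lemmas : List String) (max_gap : Int) (out : List String) : Decidable (Spec_extract_word_pairs lemmas max_gap out) := by unfold Spec_extract_word_pairs; infer_instance

-- ===== CLAIM (what is proved, stated in full; the proofs are below) =====
def Claim_equal_extract_word_pairs : Prop := ∀ (lemmas : List String) (max_gap : Int), Dom_extract_word_pairs lemmas max_gap → Spec_extract_word_pairs lemmas max_gap (extract_word_pairs lemmas max_gap)

-- ===== LEMMAS AND PROOFS =====

theorem key_eq (w v : String) : ewp_key w v = make_bigram_key w v := by
  simp only [ewp_key, make_bigram_key, min_def, max_def]
  split <;> rfl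

-- the flat key stream, structurally: per position, keys to the next `limit` nonempty lemmas
def flatRef (limit : Nat) : List String → List String
  | [] => []
  | w :: tl =>
    (if w = "" then [] else ((tl.take limit).filter (fun v => v ≠ "")).map (fun v => ewp_key w v))
      ++ flatRef limit tl

-- B's foldr state is (take limit of the suffix, segments whose flatten is flatRef)
theorem ewp_foldr_spec (limit : Nat) :
    ∀ (l : List String),
      (l.foldr (fun w st =>
        let seg := if w = "" then ([] : List String)
                   else (st.1.filter (fun v => v ≠ "")).map (fun v => ewp_key w v)
        ((w :: st.1).take limit, seg :: st.2))
        (([] : List String), ([] : List (List String)))).1 = l.take limit ∧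
      (l.foldr (fun w st =>
        let seg := if w = "" then ([] : List String)
                   else (st.1.filter (fun v => v ≠ "")).map (fun v => ewp_key w v)
        ((w :: st.1).take limit, seg :: st.2))
        (([] : List String), ([] : List (List String)))).2.flatten = flatRef limit l := by
  intro l
  induction l with
  | nil => exact ⟨by simp, rfl⟩
  | cons w tl ih =>
    have htt : List.take limit (w :: List.take limit tl) = List.take limit (w :: tl) := by
      cases limit with
      | zero => simp
      | succ k =>
        rw [List.take_succ_cons, List.take_succ_cons, List.take_take, Nat.min_eq_left (by omega)]
    refine ⟨?_, ?_⟩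
    · simp only [List.foldr_cons, ih.1, htt]
    · simp only [List.foldr_cons, List.flatten_cons, ih.1, ih.2, flatRef]

theorem alt_eq_flatRef (lemmas : List String) (max_gap : Int) :
    extract_word_pairs_alt lemmas max_gap =
      PySem.Set.ofList (flatRef (max_gap + 1).toNat lemmas) := by
  unfold extract_word_pairs_alt
  dsimp only
  rw [(ewp_foldr_spec (max_gap + 1).toNat lemmas).2]

-- ===== A side: reduce the index folds to a structural reference, then to flatRef =====

-- A-side reference: row-wise over the enumerated list, inner scan as a filter
def aref (window : Int) :
    List (Int × String) → PySem.Set String → PySem.Set String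
  | [], s => s
  | p :: rest, s => aref window rest (if p.2 = "" then s
      else ((rest.filter (fun r => decide (r.1 ≤ p.1 + window) && decide (r.2 ≠ ""))).foldl
        (fun s r => PySem.Set.add s (make_bigram_key p.2 r.2)) s))

-- enumerate commutes with drop
theorem enumerate_drop (xs : List String) :
    ∀ (m : Nat) (s : Int),
      (PySem.List.enumerate xs s).drop m = PySem.List.enumerate (xs.drop m) (s + m) := by
  induction xs with
  | nil => intro m s; simp [PySem.List.enumerate_nil]
  | cons x xs ih =>
    intro m s
    cases m with
    | zero => simp
    | succ m =>
      rw [PySem.List.enumerate_cons, List.drop_succ_cons, List.drop_succ_cons, ih m (s + 1)]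
      congr 1
      push_cast
      ring

-- a take of an enumeration is a filter on the index
theorem enumerate_filter_nil (c : Int) :
    ∀ (xs : List String) (s : Int), c ≤ s →
      (PySem.List.enumerate xs s).filter (fun p => decide (p.1 < c)) = [] := by
  intro xs
  induction xs with
  | nil => intro s _; simp [PySem.List.enumerate_nil]
  | cons x xs ih =>
    intro s hcs
    rw [PySem.List.enumerate_cons, List.filter_cons_of_neg (by simp; omega), ih (s + 1) (by omega)]

theorem enumerate_take_eq_filter (c : Int) :
    ∀ (xs : List String) (s : Int),
      (PySem.List.enumerate xs s).take (c - s).toNat =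
        (PySem.List.enumerate xs s).filter (fun p => decide (p.1 < c)) := by
  intro xs
  induction xs with
  | nil => intro s; simp [PySem.List.enumerate_nil]
  | cons x xs ih =>
    intro s
    rw [PySem.List.enumerate_cons]
    by_cases hcs : s < c
    · have h1 : (c - s).toNat = (c - (s + 1)).toNat + 1 := by omega
      rw [h1, List.take_succ_cons, List.filter_cons_of_pos (by simpa using hcs), ih (s + 1)]
    · have h1 : (c - s).toNat = 0 := by omega
      rw [h1, List.take_zero, List.filter_cons_of_neg (by simp; omega),
        enumerate_filter_nil c xs (s + 1) (by omega)]

-- take commutes with enumerate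
theorem enumerate_take (k : Nat) :
    ∀ (xs : List String) (s : Int),
      (PySem.List.enumerate xs s).take k = PySem.List.enumerate (xs.take k) s := by
  induction k with
  | zero => intro xs s; simp [PySem.List.enumerate_nil]
  | succ k ih =>
    intro xs s
    cases xs with
    | nil => simp [PySem.List.enumerate_nil]
    | cons x xs =>
      rw [PySem.List.enumerate_cons, List.take_succ_cons, List.take_succ_cons,
        PySem.List.enumerate_cons, ih xs (s + 1)]

-- folding adds of keys over the nonempty entries of an enumeration only reads the lemmas
theorem foldl_key_enumerate (w : String) :
    ∀ (xs : List String) (s : Int) (acc : PySem.Set String),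
      ((PySem.List.enumerate xs s).filter (fun r => decide (r.2 ≠ ""))).foldl
        (fun a r => PySem.Set.add a (make_bigram_key w r.2)) acc =
      ((xs.filter (fun v => decide (v ≠ ""))).map (fun v => ewp_key w v)).foldl
        PySem.Set.add acc := by
  intro xs
  induction xs with
  | nil => intro s acc; simp [PySem.List.enumerate_nil]
  | cons x xs ih =>
    intro s acc
    rw [PySem.List.enumerate_cons]
    by_cases hx : x = ""
    · rw [List.filter_cons_of_neg (by simp [hx]), List.filter_cons_of_neg (by simp [hx]), ih]
    · rw [List.filter_cons_of_pos (by simp [hx]), List.filter_cons_of_pos (by simp [hx]),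
        List.map_cons, List.foldl_cons, List.foldl_cons, ih, key_eq]

-- aref over an enumeration is the add-fold of the flat key stream
theorem aref_eq_foldl_flatRef (window : Int) :
    ∀ (tl : List String) (i : Int) (s : PySem.Set String),
      aref window (PySem.List.enumerate tl i) s =
        (flatRef window.toNat tl).foldl PySem.Set.add s := by
  intro tl
  induction tl with
  | nil => intro i s; simp [PySem.List.enumerate_nil, aref, flatRef]
  | cons w tl ih =>
    intro i s
    rw [PySem.List.enumerate_cons]
    show aref window ((i, w) :: PySem.List.enumerate tl (i + 1)) s = _
    rw [aref, flatRef, List.foldl_append, ih]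
    congr 1
    by_cases hw : w = ""
    · simp [hw]
    · rw [if_neg hw, if_neg hw]
      have hfil : (PySem.List.enumerate tl (i + 1)).filter
          (fun r => decide (r.1 ≤ i + window) && decide (r.2 ≠ "")) =
          ((PySem.List.enumerate tl (i + 1)).filter (fun r => decide (r.1 < i + 1 + window))).filter
            (fun r => decide (r.2 ≠ "")) := by
        rw [List.filter_filter]
        apply List.filter_congr
        intro r _
        simp only [Bool.and_comm]
        congr 1
        simp only [decide_eq_decide]
        omega
      rw [hfil, ← enumerate_take_eq_filter (i + 1 + window) tl (i + 1)]
      have hc : (i + 1 + window - (i + 1)).toNat = window.toNat := by omega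
      rw [hc, enumerate_take, foldl_key_enumerate]

-- A's inner loop, for an in-range anchor, named
def astep (lemmas : List String) (window : Int) (s : PySem.Set String) (p : Int × String) :
    PySem.Set String :=
  if p.2 = "" then s
  else ((PySem.List.enumerate (lemmas.drop (p.1 + 1).toNat) (p.1 + 1)).filter
          (fun r => decide (r.1 ≤ p.1 + window) && decide (r.2 ≠ ""))).foldl
        (fun s r => PySem.Set.add s (make_bigram_key p.2 r.2)) s

-- A's pyRange/pyGetD fold is a fold over a contiguous segment of the enumeration
theorem foldl_pyRange_seg {β : Type} (xs : List String) (F : β → Int × String → β) (b : Int)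
    (hbn : b ≤ (xs.length : Int)) :
    ∀ (a : Int) (s : β), 0 ≤ a →
      (PySem.List.pyRange a b 1).foldl (fun s j => F s (j, PySem.List.pyGetD xs j "")) s =
        (((PySem.List.enumerate xs 0).drop a.toNat).take (b - a).toNat).foldl F s := by
  intro a
  induction hk : (b - a).toNat generalizing a with
  | zero =>
    intro s ha
    have hab : b ≤ a := by omega
    rw [PySem.List.pyRange_one_eq_nil hab, List.take_zero]
    rfl
  | succ k ih =>
    intro s ha
    have hab : a < b := by omega
    have halen : a.toNat < (PySem.List.enumerate xs 0).length := by
      rw [PySem.List.length_enumerate]; omega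
    rw [PySem.List.pyRange_one_cons hab, List.foldl_cons,
      List.drop_eq_getElem_cons halen, List.take_succ_cons, List.foldl_cons,
      PySem.List.getElem_enumerate]
    have hgete : ((0 : Int) + a.toNat, xs[a.toNat]) = (a, PySem.List.pyGetD xs a "") := by
      have h2 : PySem.List.pyGetD xs a "" = xs[a.toNat] :=
        PySem.List.pyGetD_eq_getElem _ _ ha (by omega)
      rw [h2]
      congr 1
      omega
    rw [hgete]
    have h3 : a.toNat + 1 = (a + 1).toNat := by omega
    rw [h3, ih (a + 1) (by omega) (F s (a, PySem.List.pyGetD xs a "")) (by omega)]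

-- A's inner loop, for an in-range anchor, is exactly astep
theorem inner_eq_astep (lemmas : List String) (window : Int) (i : Int) (w : String)
    (hi0 : 0 ≤ i) (hin : i < (lemmas.length : Int)) (s : PySem.Set String) :
    (if w = "" then s
     else (PySem.List.pyRange (i + 1) (min (i + window + 1) (lemmas.length : Int)) 1).foldl
      (fun pairs j =>
        if PySem.List.pyGetD lemmas j "" ≠ "" then
          PySem.Set.add pairs (make_bigram_key w (PySem.List.pyGetD lemmas j ""))
        else pairs) s) = astep lemmas window s (i, w) := by
  unfold astep
  by_cases he : w = ""
  · simp [he]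
  · rw [if_neg he, if_neg he]
    rw [foldl_pyRange_seg lemmas
      (fun s r => if r.2 ≠ "" then PySem.Set.add s (make_bigram_key w r.2) else s)
      (min (i + window + 1) (lemmas.length : Int)) (by omega) (i + 1) s (by omega)]
    rw [enumerate_drop lemmas (i + 1).toNat 0]
    have hstart : (0 : Int) + ((i + 1).toNat : Int) = i + 1 := by omega
    rw [hstart, enumerate_take_eq_filter]
    rw [PySem.List.foldl_ite_eq_foldl_filter, List.filter_filter]
    congr 1
    apply List.filter_congr
    intro r hr
    rcases (PySem.List.mem_enumerate_iff _ _ _).mp hr with ⟨k, hklt, hrk⟩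
    have hr1 : r.1 = i + 1 + k := by rw [hrk]
    have hlen : (lemmas.drop (i + 1).toNat).length = lemmas.length - (i + 1).toNat := by
      simp
    have hrlt : r.1 < (lemmas.length : Int) := by
      rw [hr1]; rw [hlen] at hklt; omega
    simp only [Bool.and_comm]
    congr 1
    simp only [decide_eq_decide]
    omega

-- outer induction: A's fold of astep over the enumeration of a suffix equals aref
theorem foldl_astep_eq_aref (lemmas : List String) (window : Int) :
    ∀ (tl : List String) (m : Nat) (s : PySem.Set String), lemmas.drop m = tl →
      (PySem.List.enumerate tl m).foldl (astep lemmas window) s =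
        aref window (PySem.List.enumerate tl m) s := by
  intro tl
  induction tl with
  | nil => intro m s _; rfl
  | cons w tl' ih =>
    intro m s hdrop
    have hdrop1 : lemmas.drop (m + 1) = tl' := by
      have := congrArg (List.drop 1) hdrop
      simpa [List.drop_drop, Nat.add_comm] using this
    rw [PySem.List.enumerate_cons, List.foldl_cons]
    show _ = aref window ((↑m, w) :: PySem.List.enumerate tl' (↑m + 1)) s
    rw [aref]
    have hcast : ((m : Int) + 1) = (((m + 1 : Nat) : Int)) := by push_cast; ring
    rw [hcast, ih (m + 1) _ hdrop1]
    congr 1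
    unfold astep
    by_cases he : w = ""
    · simp [he]
    · rw [if_neg he, if_neg he]
      have hm1 : (((m + 1 : Nat) : Int)).toNat = m + 1 := by omega
      dsimp only
      rw [hcast, hm1, hdrop1]

-- A equals aref on the full enumeration
theorem a_eq_aref (lemmas : List String) (max_gap : Int) :
    extract_word_pairs lemmas max_gap =
      aref (max_gap + 1) (PySem.List.enumerate lemmas 0) PySem.Set.empty := by
  unfold extract_word_pairs
  rw [foldl_pyRange_seg lemmas
    (fun s p => if p.2 = "" then s
      else (PySem.List.pyRange (p.1 + 1) (min (p.1 + (max_gap + 1) + 1) (lemmas.length : Int)) 1).foldl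
        (fun pairs j =>
          if PySem.List.pyGetD lemmas j "" ≠ "" then
            PySem.Set.add pairs (make_bigram_key p.2 (PySem.List.pyGetD lemmas j ""))
          else pairs) s)
    (lemmas.length : Int) (by omega) 0 PySem.Set.empty (by omega)]
  have htake : (((PySem.List.enumerate lemmas 0).drop (0 : Int).toNat).take
      ((lemmas.length : Int) - 0).toNat) = PySem.List.enumerate lemmas 0 := by
    simp [PySem.List.length_enumerate]
  rw [htake]
  refine Eq.trans (PySem.List.foldl_congr_mem _ _ (astep lemmas (max_gap + 1)) _ ?_) ?_
  · intro acc p hp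
    rcases (PySem.List.mem_enumerate_iff _ _ _).mp hp with ⟨k, hklt, hpk⟩
    have h1 : (0 : Int) ≤ p.1 := by rw [hpk]; simp
    have h2 : p.1 < (lemmas.length : Int) := by rw [hpk]; simpa using hklt
    exact inner_eq_astep lemmas (max_gap + 1) p.1 p.2 h1 h2 acc
  · have h0 : ((0 : Int)) = (((0 : Nat) : Int)) := by norm_num
    rw [h0, foldl_astep_eq_aref lemmas (max_gap + 1) lemmas 0 PySem.Set.empty (by simp)]

-- ===== VERDICT (by name: the statement is the Claim_ definition above) =====
theorem extract_word_pairs_spec : Claim_equal_extract_word_pairs := by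
  intro lemmas max_gap _
  unfold Spec_extract_word_pairs
  rw [a_eq_aref, alt_eq_flatRef,
    aref_eq_foldl_flatRef (max_gap + 1) lemmas 0 PySem.Set.empty,
    PySem.Set.ofList_eq_foldl]
  rfl
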